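-- pv_equiv track=rewrite | github.com/cmusmashlab/prism-tracker | analysis/src/prism_tracker/preprocessing/annotation.py | overwrite_other_labels
-- ===== SOURCE A (Python) =====
-- def overwrite_other_labels(labels):
--     """
--     Overwrite 'Other' labels by their previous label.
--     Make sure to remove 'Other' in the beginning and ending before applying this function.
--     """
--     output = []
--     assert labels[0] != 'Other'
--     prev = labels[0]
--     for label in labels:
--         if label != 'Other':
--             output.append(label)
--             prev = label
--         else:
--             output.append(prev)
--     return output
-- ===== SOURCE B (Python) =====
-- from itertools import groupby
--
-- def overwrite_other_labels(labels):
--     assert labels[0] != 'Other'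
--     out = []
--     for is_other, grp in groupby(labels, key=lambda l: l == 'Other'):
--         block = list(grp)
--         if is_other:
--             out.extend([out[-1]] * len(block))
--         else:
--             out.extend(block)
--     return out
-- ===== Notes on version B (the rewrite author's own statement) =====
-- stated objective: alternative
-- what changed: Replaces the element-wise forward-fill loop with a run-based algorithm: groupby splits the list into maximal 'Other'/non-'Other' runs, non-'Other' runs are copied wholesale and each 'Other' run is filled by replicating the last element already in the output.
import Mathlib
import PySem

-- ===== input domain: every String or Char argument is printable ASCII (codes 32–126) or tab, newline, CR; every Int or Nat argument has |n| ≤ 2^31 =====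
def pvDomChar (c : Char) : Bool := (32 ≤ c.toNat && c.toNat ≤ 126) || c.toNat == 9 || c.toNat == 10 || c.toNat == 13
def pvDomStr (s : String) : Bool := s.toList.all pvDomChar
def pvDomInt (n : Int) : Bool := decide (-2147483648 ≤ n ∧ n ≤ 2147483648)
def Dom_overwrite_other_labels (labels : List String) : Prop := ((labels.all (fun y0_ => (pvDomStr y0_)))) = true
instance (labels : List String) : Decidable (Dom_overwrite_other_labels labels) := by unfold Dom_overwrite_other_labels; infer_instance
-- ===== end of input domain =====

-- B replaces A's element-wise forward-fill loop by a run-based algorithm: split into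
-- maximal 'Other'/non-'Other' runs and fill each 'Other' run by replicating the last
-- output element (objective: alternative).

-- ===== PORT A =====
-- A: output = []; prev = labels[0]; append label or prev per element.
def overwrite_other_labels (labels : List String) : List String :=
  match labels.head? with
  | none => []            -- labels[0] raises IndexError: excluded by Pre_
  | some h =>
    if h == "Other" then []   -- assert fails: excluded by Pre_
    else
      (labels.foldl
        (fun (s : List String × String) label =>
          if label ≠ "Other" then (s.1 ++ [label], label) else (s.1 ++ [s.2], s.2))
        ([], h)).1

-- ===== PORT B =====
-- itertools.groupby(labels, key = l == 'Other'): maximal runs of equal key, in order.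
def pvGroupBy : List String → List (Bool × List String)
  | [] => []
  | x :: xs =>
    ((x == "Other"), x :: xs.takeWhile (fun y => (y == "Other") == (x == "Other"))) ::
      pvGroupBy (xs.dropWhile (fun y => (y == "Other") == (x == "Other")))
termination_by l => l.length
decreasing_by
  simpa using Nat.lt_succ_of_le (List.length_dropWhile_le _ _)

def overwrite_other_labels_alt (labels : List String) : List String :=
  match labels with
  | [] => []              -- labels[0] raises IndexError: excluded by Pre_
  | h :: t =>
    if h == "Other" then []   -- assert fails: excluded by Pre_
    else
      (pvGroupBy (h :: t)).foldl
        (fun out g =>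
          if g.1 then
            -- out[-1]: out is nonempty here (the first run is non-'Other'), so
            -- getLastD "" is exactly Python's out[-1]
            out ++ List.replicate g.2.length (out.getLastD "")
          else out ++ g.2)
        []

-- ===== PRECONDITION & SPEC =====
-- A raises IndexError on [] and AssertionError when labels[0] == 'Other'; both excluded.
def Pre_overwrite_other_labels (labels : List String) : Prop :=
  labels ≠ [] ∧ labels.head? ≠ some "Other"
instance (labels : List String) : Decidable (Pre_overwrite_other_labels labels) := by
  unfold Pre_overwrite_other_labels; infer_instance

def pvWitness_overwrite_other_labels : List String := ["walk", "Other", "run", "Other"]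

def Spec_overwrite_other_labels (labels : List String) (out : List String) : Prop := out = overwrite_other_labels_alt labels
instance (labels : List String) (out : List String) : Decidable (Spec_overwrite_other_labels labels out) := by unfold Spec_overwrite_other_labels; infer_instance

-- ===== CLAIM (what is proved, stated in full; the proofs are below) =====
def Claim_equal_overwrite_other_labels : Prop := ∀ (labels : List String), Dom_overwrite_other_labels labels → Pre_overwrite_other_labels labels → Spec_overwrite_other_labels labels (overwrite_other_labels labels)

-- ===== LEMMAS AND PROOFS =====

-- Abbreviation for B's fold step (proof-side only; definitionally the fold's lambda).
def pvStep (out : List String) (g : Bool × List String) : List String :=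
  if g.1 then out ++ List.replicate g.2.length (out.getLastD "") else out ++ g.2

theorem pvStep_true (out ys : List String) :
    pvStep out (true, ys) = out ++ List.replicate ys.length (out.getLastD "") := by
  simp [pvStep]

theorem pvStep_false (out ys : List String) :
    pvStep out (false, ys) = out ++ ys := by
  simp [pvStep]

-- The element-wise forward fill (characterises A's loop).
def pvAccum (prev : String) : List String → List String
  | [] => []
  | x :: xs =>
    let y := if x ≠ "Other" then x else prev
    y :: pvAccum y xs

theorem foldl_eq_accum (l : List String) (acc : List String) (prev : String) :
    (l.foldl
      (fun (s : List String × String) label =>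
        if label ≠ "Other" then (s.1 ++ [label], label) else (s.1 ++ [s.2], s.2))
      (acc, prev)).1 = acc ++ pvAccum prev l := by
  induction l generalizing acc prev with
  | nil => simp [pvAccum]
  | cons x xs ih =>
    simp only [List.foldl_cons]
    by_cases hx : x = "Other"
    · subst hx
      rw [if_neg (by simp), ih]
      simp [pvAccum]
    · rw [if_pos hx, ih]
      simp [pvAccum, hx]

theorem accum_nonother (ys : List String) (prev : String) (zs : List String)
    (h : ∀ y ∈ ys, ¬(y = "Other")) :
    pvAccum prev (ys ++ zs) = ys ++ pvAccum (ys.getLastD prev) zs := by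
  induction ys generalizing prev with
  | nil => simp
  | cons y ys ih =>
    have hy : ¬(y = "Other") := h y (by simp)
    simp only [List.cons_append, pvAccum, if_pos hy]
    rw [ih _ (fun z hz => h z (by simp [hz]))]
    cases ys <;> simp [List.getLastD]

theorem accum_other (ys : List String) (prev : String) (zs : List String)
    (h : ∀ y ∈ ys, y = "Other") :
    pvAccum prev (ys ++ zs) = List.replicate ys.length prev ++ pvAccum prev zs := by
  induction ys with
  | nil => simp
  | cons y ys ih =>
    have hy : y = "Other" := h y (by simp)
    subst hy
    simp only [List.cons_append, pvAccum]
    rw [if_neg (by simp), ih (fun z hz => h z (by simp [hz]))]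
    simp [List.replicate_succ]

theorem getLastD_replicate (n : Nat) (a d : String) :
    (List.replicate (n + 1) a).getLastD d = a := by
  induction n with
  | zero => rfl
  | succ n ih => simpa [List.replicate_succ, List.getLastD] using ih

theorem getLastD_append_left (l₁ l₂ : List String) (d : String) (h : l₂ ≠ []) :
    (l₁ ++ l₂).getLastD d = l₂.getLastD d := by
  obtain ⟨z, hz⟩ : ∃ z, l₂.getLast? = some z := by
    cases hz : l₂.getLast? with
    | none => exact absurd (List.getLast?_eq_none_iff.1 hz) h
    | some z => exact ⟨z, rfl⟩
  simp [List.getLastD_eq_getLast?, List.getLast?_append, hz]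

-- Loop invariant: the run-based fold over the groups of l, started from any out whose
-- last element is prev, produces out followed by the element-wise forward fill of l.
theorem groups_eq (l out : List String) (prev : String)
    (h : out.getLastD "" = prev) :
    (pvGroupBy l).foldl pvStep out = out ++ pvAccum prev l := by
  match l with
  | [] => simp [pvGroupBy, pvAccum]
  | x :: xs =>
    rw [pvGroupBy]
    simp only [List.foldl_cons]
    by_cases hx : x = "Other"
    · subst hx
      have hkey : (("Other" : String) == "Other") = true := by simp
      simp only [hkey]
      have hrun : ∀ y ∈ ("Other" :: xs.takeWhile (fun y => (y == "Other") == true)),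
          y = "Other" := by
        intro y hy
        rcases List.mem_cons.1 hy with rfl | hy
        · rfl
        · simpa using List.mem_takeWhile_imp hy
      have hsplit : ("Other":String) :: xs =
          ("Other" :: xs.takeWhile (fun y => (y == "Other") == true)) ++
            xs.dropWhile (fun y => (y == "Other") == true) := by
        simp [List.takeWhile_append_dropWhile]
      rw [pvStep_true]
      rw [groups_eq _ _ prev (by
        rw [getLastD_append_left _ _ _ (by simp [List.replicate_succ]), h]
        exact getLastD_replicate _ _ _)]
      rw [hsplit, accum_other _ _ _ hrun, h]
      simp
    · have hkey : ((x : String) == "Other") = false := by simpa using hx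
      simp only [hkey]
      have hrun : ∀ y ∈ (x :: xs.takeWhile (fun y => (y == "Other") == false)),
          ¬(y = "Other") := by
        intro y hy
        rcases List.mem_cons.1 hy with rfl | hy
        · exact hx
        · simpa using List.mem_takeWhile_imp hy
      have hsplit : x :: xs =
          (x :: xs.takeWhile (fun y => (y == "Other") == false)) ++
            xs.dropWhile (fun y => (y == "Other") == false) := by
        simp [List.takeWhile_append_dropWhile]
      rw [pvStep_false]
      rw [groups_eq _ _ ((x :: xs.takeWhile (fun y => (y == "Other") == false)).getLastD prev)
        (by
          rw [getLastD_append_left _ _ _ (by simp)]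
          cases hys : xs.takeWhile (fun y => (y == "Other") == false) <;>
            simp [List.getLastD])]
      rw [hsplit, accum_nonother _ _ _ hrun]
      simp
termination_by l.length
decreasing_by
  all_goals simpa using Nat.lt_succ_of_le (List.length_dropWhile_le _ _)

-- ===== VERDICT (by name: the statement is the Claim_ definition above) =====
theorem overwrite_other_labels_spec : Claim_equal_overwrite_other_labels := by
  intro labels _ hpre
  obtain ⟨hne, hhd⟩ := hpre
  match labels with
  | [] => exact absurd rfl hne
  | h :: t =>
    have hh : h ≠ "Other" := by simpa using hhd
    unfold Spec_overwrite_other_labels overwrite_other_labels overwrite_other_labels_alt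
    simp only [List.head?]
    rw [foldl_eq_accum]
    have hB := groups_eq (h :: t) [] "" (by simp)
    rw [show ((pvGroupBy (h :: t)).foldl
        (fun out (g : Bool × List String) =>
          if g.1 then out ++ List.replicate g.2.length (out.getLastD "") else out ++ g.2) [])
        = (pvGroupBy (h :: t)).foldl pvStep [] from rfl, hB]
    simp [pvAccum, hh]
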